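-- pv_equiv track=rewrite | github.com/trianglegrrl/yallHap | src/yallhap/validation.py | _estimate_depth
-- ===== SOURCE A (Python) =====
-- def _estimate_depth(haplogroup: str) -> int:
--     """
--     Estimate haplogroup depth/specificity.
--
--     Simple heuristic based on length and structure.
--     """
--     if not haplogroup:
--         return 0
--
--     # For ISOGG format like R1b1a2a1a2c1, count alphanumeric chars
--     # For YFull format like R-L21, count parts
--
--     if "-" in haplogroup:
--         # YFull format - count number of dashes + 1
--         return haplogroup.count("-") + 1
--     else:
--         # ISOGG format - count transitions between letters and numbers
--         depth = 0
--         prev_is_digit = False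
--         for char in haplogroup:
--             if char.isdigit() != prev_is_digit:
--                 depth += 1
--                 prev_is_digit = char.isdigit()
--         return max(depth, 1)
-- ===== SOURCE B (Python) =====
-- def _estimate_depth(haplogroup: str) -> int:
--     """
--     Estimate haplogroup depth/specificity.
--
--     Simple heuristic based on length and structure.
--     """
--     if not haplogroup:
--         return 0
--     if "-" in haplogroup:
--         # YFull format - count number of dashes + 1
--         return haplogroup.count("-") + 1
--     # ISOGG format: count maximal digit runs by skipping whole runs,
--     # then use the closed formula
--     #   depth = 2 * digit_runs - (1 if the string ends in a digit)
--     # (each digit run is entered once and, unless it ends the string,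
--     # exited once; those entries/exits are exactly the transitions).
--     digit_runs = 0
--     i, n = 0, len(haplogroup)
--     while i < n:
--         if haplogroup[i].isdigit():
--             digit_runs += 1
--             while i < n and haplogroup[i].isdigit():
--                 i += 1
--         else:
--             while i < n and not haplogroup[i].isdigit():
--                 i += 1
--     depth = 2 * digit_runs - (1 if haplogroup[-1].isdigit() else 0)
--     return max(depth, 1)
-- ===== Notes on version B (the rewrite author's own statement) =====
-- stated objective: alternative
-- what changed: The ISOGG branch no longer counts letter/digit transitions with a running prev_is_digit flag: B counts maximal digit runs by a run-skipping loop and derives the depth from the closed formula 2*digit_runs - (1 if the last character is a digit).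
import Mathlib
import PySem

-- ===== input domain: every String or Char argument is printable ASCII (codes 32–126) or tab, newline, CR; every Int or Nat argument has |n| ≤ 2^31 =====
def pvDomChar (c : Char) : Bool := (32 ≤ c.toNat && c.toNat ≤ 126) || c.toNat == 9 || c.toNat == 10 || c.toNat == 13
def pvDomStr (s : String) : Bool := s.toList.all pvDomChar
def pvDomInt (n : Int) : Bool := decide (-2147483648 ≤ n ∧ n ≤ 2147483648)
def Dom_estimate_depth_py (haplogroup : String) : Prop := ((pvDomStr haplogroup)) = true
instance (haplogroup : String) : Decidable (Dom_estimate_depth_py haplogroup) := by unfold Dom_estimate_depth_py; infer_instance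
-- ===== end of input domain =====

-- B replaces A's transition-counting state machine by a run-skipping count of maximal
-- digit runs plus the closed formula 2*digit_runs - (last char is digit) (alternative, same cost).

-- ===== PORT A =====
-- transition-counting scan with running (depth, prev_is_digit) state
def estimate_depth_py (haplogroup : String) : Int :=
  if haplogroup.toList = [] then 0
  else if haplogroup.toList.contains '-' then
    (haplogroup.toList.count '-' : Int) + 1
  else
    let st := haplogroup.toList.foldl
      (fun (s : Int × Bool) c =>
        if c.isDigit != s.2 then (s.1 + 1, c.isDigit) else s) (0, false)
    max st.1 1

-- ===== PORT B =====
-- Source B's run-skipping while loop: each step consumes one maximal same-class run;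
-- a digit run adds 1 to the count
def pvDigitRuns : List Char → Int
  | [] => 0
  | c :: r =>
    if c.isDigit then 1 + pvDigitRuns (r.dropWhile Char.isDigit)
    else pvDigitRuns (r.dropWhile (fun d => !d.isDigit))
termination_by l => l.length
decreasing_by
  · exact Nat.lt_succ_of_le (List.length_dropWhile_le _ _)
  · exact Nat.lt_succ_of_le (List.length_dropWhile_le _ _)

def estimate_depth_py_alt (haplogroup : String) : Int :=
  if haplogroup.toList = [] then 0
  else if haplogroup.toList.contains '-' then
    (haplogroup.toList.count '-' : Int) + 1
  else
    let l := haplogroup.toList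
    let lastDigit : Int :=            -- 1 if haplogroup[-1].isdigit() else 0
      match PySem.List.pyGet? l (-1) with
      | some c => if c.isDigit then 1 else 0
      | none => 0
    max (2 * pvDigitRuns l - lastDigit) 1

-- ===== PRECONDITION & SPEC =====
def Spec_estimate_depth_py (haplogroup : String) (out : Int) : Prop := out = estimate_depth_py_alt haplogroup
instance (haplogroup : String) (out : Int) : Decidable (Spec_estimate_depth_py haplogroup out) := by unfold Spec_estimate_depth_py; infer_instance

-- ===== CLAIM (what is proved, stated in full; the proofs are below) =====
def Claim_equal_estimate_depth_py : Prop := ∀ (haplogroup : String), Dom_estimate_depth_py haplogroup → Spec_estimate_depth_py haplogroup (estimate_depth_py haplogroup)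

-- ===== LEMMAS AND PROOFS =====

-- number of digit/non-digit transitions in l, starting from previous flag p (A's scan)
def pvChg (p : Bool) : List Char → Int
  | [] => 0
  | c :: r => (if c.isDigit != p then 1 else 0) + pvChg c.isDigit r

theorem pvFoldA (l : List Char) : ∀ (acc : Int) (p : Bool),
    (l.foldl (fun (s : Int × Bool) c =>
      if c.isDigit != s.2 then (s.1 + 1, c.isDigit) else s) (acc, p)).1
      = acc + pvChg p l := by
  induction l with
  | nil => intro acc p; simp [pvChg]
  | cons c r ih =>
    intro acc p
    rw [List.foldl_cons, pvChg]
    by_cases h : c.isDigit = p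
    · rw [if_neg (by simp [h]), if_neg (by simp [h]), ih]
      simp [h]
    · rw [if_pos (by simp [h]), if_pos (by simp [h]), ih]
      ring

-- 1 if the last char is a digit, else 0 (0 on [])
def pvLastD (l : List Char) : Int :=
  match l.getLast? with
  | some c => if c.isDigit then 1 else 0
  | none => 0

theorem pvChg_digits (t : List Char) (h : ∀ c ∈ t, c.isDigit = true) (s : List Char) :
    pvChg true (t ++ s) = pvChg true s := by
  induction t with
  | nil => rfl
  | cons c r ih =>
    have hc : c.isDigit = true := h c (by simp)
    rw [List.cons_append, pvChg, hc]
    simp [ih (fun d hd => h d (by simp [hd]))]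

theorem pvChg_nondigits (t : List Char) (h : ∀ c ∈ t, c.isDigit = false) (s : List Char) :
    pvChg false (t ++ s) = pvChg false s := by
  induction t with
  | nil => rfl
  | cons c r ih =>
    have hc : c.isDigit = false := h c (by simp)
    rw [List.cons_append, pvChg, hc]
    simp [ih (fun d hd => h d (by simp [hd]))]

theorem pvLastD_append (t s : List Char) (hs : s ≠ []) : pvLastD (t ++ s) = pvLastD s := by
  unfold pvLastD
  rw [List.getLast?_append_of_ne_nil t hs]

theorem pvLastD_all_digits (l : List Char) (hne : l ≠ []) (h : ∀ c ∈ l, c.isDigit = true) :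
    pvLastD l = 1 := by
  unfold pvLastD
  rw [List.getLast?_eq_some_getLast hne]
  simp [h _ (List.getLast_mem hne)]

theorem pvLastD_all_nondigits (l : List Char) (h : ∀ c ∈ l, c.isDigit = false) :
    pvLastD l = 0 := by
  unfold pvLastD
  cases hg : l.getLast? with
  | none => rfl
  | some c =>
    have : c ∈ l := List.mem_of_getLast? hg
    simp [h c this]

theorem pvDropHead (p : Char → Bool) : ∀ (l : List Char) (x : Char) (s' : List Char),
    l.dropWhile p = x :: s' → p x = false := by
  intro l
  induction l with
  | nil => intro x s' h; simp [List.dropWhile] at h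
  | cons c r ih =>
    intro x s' h
    rw [List.dropWhile_cons] at h
    by_cases hc : p c = true
    · rw [if_pos hc] at h; exact ih x s' h
    · rw [if_neg hc] at h
      obtain ⟨rfl, -⟩ := List.cons.inj h
      simpa using hc

-- the key characterisation: A's transition count from the initial prev=False state
-- equals twice the number of maximal digit runs minus one if the string ends in a digit
theorem pvChg_eq (l : List Char) : pvChg false l = 2 * pvDigitRuns l - pvLastD l := by
  induction l using pvDigitRuns.induct with
  | case1 => simp [pvChg, pvDigitRuns, pvLastD]
  | case2 c r hc ih =>
    have hsplit : r.takeWhile Char.isDigit ++ r.dropWhile Char.isDigit = r :=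
      List.takeWhile_append_dropWhile
    have ht : ∀ d ∈ r.takeWhile Char.isDigit, d.isDigit = true :=
      fun d hd => List.mem_takeWhile_imp hd
    have hr : pvChg true r = pvChg true (r.dropWhile Char.isDigit) := by
      conv_lhs => rw [← hsplit]
      exact pvChg_digits _ ht _
    have hD : pvDigitRuns (c :: r) = 1 + pvDigitRuns (r.dropWhile Char.isDigit) := by
      rw [pvDigitRuns, if_pos hc]
    rw [pvChg, hc, hD]
    cases hs : r.dropWhile Char.isDigit with
    | nil =>
      rw [hs] at hr
      have hall : ∀ d ∈ c :: r, d.isDigit = true := by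
        intro d hd
        rcases List.mem_cons.mp hd with rfl | hd
        · exact hc
        · rw [← hsplit, hs, List.append_nil] at hd
          exact ht d hd
      rw [pvLastD_all_digits _ (by simp) hall, hr]
      have h0 : pvDigitRuns ([] : List Char) = 0 := by simp [pvDigitRuns]
      rw [h0]
      norm_num [pvChg]
    | cons x s' =>
      have hx : x.isDigit = false := pvDropHead _ r x s' hs
      rw [hs] at hr ih
      rw [pvChg, hx] at hr ih
      norm_num at hr ih
      have hlast : pvLastD (c :: r) = pvLastD (x :: s') := by
        have heq : c :: r = (c :: r.takeWhile Char.isDigit) ++ (x :: s') := by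
          rw [List.cons_append]
          congr 1
          rw [← hs, hsplit]
        rw [heq]
        exact pvLastD_append _ _ (by simp)
      rw [hlast, hr, ih]
      simp only [show ((true : Bool) != false) = true from rfl, if_pos]
      ring
  | case3 c r hc ih =>
    have hcd : c.isDigit = false := by simpa using hc
    have hsplit : r.takeWhile (fun d => !d.isDigit) ++ r.dropWhile (fun d => !d.isDigit) = r :=
      List.takeWhile_append_dropWhile
    have ht : ∀ d ∈ r.takeWhile (fun d => !d.isDigit), d.isDigit = false := by
      intro d hd
      have := List.mem_takeWhile_imp hd
      simpa using this
    have hr : pvChg false r = pvChg false (r.dropWhile (fun d => !d.isDigit)) := by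
      conv_lhs => rw [← hsplit]
      exact pvChg_nondigits _ ht _
    have hD : pvDigitRuns (c :: r) = pvDigitRuns (r.dropWhile (fun d => !d.isDigit)) := by
      rw [pvDigitRuns, if_neg (by simp [hcd])]
    rw [pvChg, hcd, hD]
    cases hs : r.dropWhile (fun d => !d.isDigit) with
    | nil =>
      rw [hs] at hr
      have hall : ∀ d ∈ c :: r, d.isDigit = false := by
        intro d hd
        rcases List.mem_cons.mp hd with rfl | hd
        · exact hcd
        · rw [← hsplit, hs, List.append_nil] at hd
          exact ht d hd
      rw [pvLastD_all_nondigits _ hall, hr]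
      have h0 : pvDigitRuns ([] : List Char) = 0 := by simp [pvDigitRuns]
      rw [h0]
      norm_num [pvChg]
    | cons x s' =>
      rw [hs] at hr ih
      have hlast : pvLastD (c :: r) = pvLastD (x :: s') := by
        have heq : c :: r = (c :: r.takeWhile (fun d => !d.isDigit)) ++ (x :: s') := by
          rw [List.cons_append]
          congr 1
          rw [← hs, hsplit]
        rw [heq]
        exact pvLastD_append _ _ (by simp)
      rw [hlast, hr, ih]
      norm_num

-- ===== VERDICT (by name: the statement is the Claim_ definition above) =====
theorem estimate_depth_py_spec : Claim_equal_estimate_depth_py := by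
  intro h _
  unfold Spec_estimate_depth_py estimate_depth_py estimate_depth_py_alt
  cases hl : h.toList with
  | nil => simp
  | cons c r =>
    simp only [reduceCtorEq, if_false]
    by_cases hd : (c :: r).contains '-' = true
    · rw [if_pos hd, if_pos hd]
    · rw [if_neg hd, if_neg hd]
      simp only [pvFoldA, zero_add, pvChg_eq]
      have hlast : PySem.List.pyGet? (c :: r) (-1) = (c :: r).getLast? := by
        simp [PySem.List.pyGet?, PySem.List.pyIdx?, List.getLast?_eq_getElem?]
      rw [hlast]
      unfold pvLastD
      rfl
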